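-- pv_equiv track=rewrite | github.com/OpenGlass-Project/openglass-asm | ogasm/__init__.py | label_separator
-- ===== SOURCE A (Python) =====
-- def label_separator(strings):
--     #Begin label separator.
--     #The label separator takes the lexed assembly code and associates labels with
--     #tokens, without specifying their locations.
--     labels_removed = []
--     known_labels = []
--     current_label = []
--     for string in strings:
--         if string.startswith(':'):
--             current_label.append(string[1:])
--             known_labels.append(string[1:])
--         else:
--             if current_label:
--                 labels_removed.append((string, tuple(current_label)))
--                 current_label = []
--             else:
--                 labels_removed.append((string, tuple()))
--     return labels_removed, known_labels
-- ===== SOURCE B (Python) =====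
-- import itertools
--
-- def label_separator(strings):
--     # Run-based decomposition: group consecutive tokens by whether they are labels,
--     # then pair each token run's first element with the pending label run.
--     removed, known, pending = [], [], []
--     for is_label, run in itertools.groupby(strings, key=lambda s: s.startswith(':')):
--         if is_label:
--             pending = [s[1:] for s in run]
--             known.extend(pending)
--         else:
--             run = list(run)
--             removed.append((run[0], tuple(pending)))
--             removed.extend((t, ()) for t in run[1:])
--             pending = []
--     return removed, known
-- ===== Notes on version B (the rewrite author's own statement) =====
-- stated objective: alternative
-- what changed: B iterates over maximal runs produced by itertools.groupby (label runs vs token runs), pairing only each token run's head with the pending label run, instead of A's element-by-element loop threading a current_label accumulator.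
import Mathlib
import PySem

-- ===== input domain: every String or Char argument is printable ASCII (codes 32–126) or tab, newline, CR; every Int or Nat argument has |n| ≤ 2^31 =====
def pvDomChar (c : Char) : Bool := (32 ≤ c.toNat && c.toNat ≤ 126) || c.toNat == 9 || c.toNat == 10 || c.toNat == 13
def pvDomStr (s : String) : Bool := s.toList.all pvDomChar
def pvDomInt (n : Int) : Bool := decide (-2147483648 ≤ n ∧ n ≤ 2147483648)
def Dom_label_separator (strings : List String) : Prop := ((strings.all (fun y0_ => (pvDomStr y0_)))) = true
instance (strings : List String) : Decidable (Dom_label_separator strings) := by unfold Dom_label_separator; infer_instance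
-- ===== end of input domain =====

-- B is an alternative run-based decomposition of the same O(n) task (not claimed faster).

-- ===== PORT A =====
-- s[1:]
def pvTail1 (s : String) : String := PySem.Str.slice s (some 1) none

-- A's loop, state = (labels_removed, known_labels, current_label)
def goA : List String → List (String × List String) → List String → List String →
    (List (String × List String)) × List String
  | [], rem, kn, _cur => (rem, kn)
  | s :: ss, rem, kn, cur =>
    if PySem.Str.startswith s ":" then
      goA ss rem (kn ++ [pvTail1 s]) (cur ++ [pvTail1 s])
    else
      if !cur.isEmpty then
        goA ss (rem ++ [(s, cur)]) kn []
      else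
        goA ss (rem ++ [(s, [])]) kn cur

def label_separator (strings : List String) : (List (String × List String)) × List String :=
  goA strings [] [] []

-- ===== PORT B =====
def isLab (s : String) : Bool := PySem.Str.startswith s ":"

-- itertools.groupby(strings, key=isLab): maximal runs of equal key, with their key
def runsB : List String → List (Bool × List String)
  | [] => []
  | x :: xs =>
    (isLab x, x :: xs.takeWhile (fun y => isLab y == isLab x)) ::
      runsB (xs.dropWhile (fun y => isLab y == isLab x))
termination_by l => l.length
decreasing_by
  have := List.length_dropWhile_le (fun y => isLab y == isLab x) xs
  simp; omega

-- B's loop over runs, state = (removed, known, pending)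
def goB : List (Bool × List String) → List (String × List String) → List String → List String →
    (List (String × List String)) × List String
  | [], rem, kn, _pend => (rem, kn)
  | (isL, grp) :: rs, rem, kn, pend =>
    if isL then
      goB rs rem (kn ++ grp.map pvTail1) (grp.map pvTail1)
    else
      match grp with
      | [] => goB rs rem kn []      -- groupby never yields an empty run
      | t :: ts => goB rs (rem ++ (t, pend) :: ts.map (fun u => (u, ([] : List String)))) kn []

def label_separator_alt (strings : List String) : (List (String × List String)) × List String :=
  goB (runsB strings) [] [] []

-- ===== PRECONDITION & SPEC =====
def Spec_label_separator (strings : List String) (out : (List (String × List String)) × List String) : Prop := out = label_separator_alt strings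
instance (strings : List String) (out : (List (String × List String)) × List String) : Decidable (Spec_label_separator strings out) := by unfold Spec_label_separator; infer_instance

-- ===== CLAIM (what is proved, stated in full; the proofs are below) =====
def Claim_equal_label_separator : Prop := ∀ (strings : List String), Dom_label_separator strings → Spec_label_separator strings (label_separator strings)

-- ===== LEMMAS AND PROOFS =====

-- A step on a token: both branches append (s, cur) and clear cur
lemma goA_token (s : String) (ss : List String) (rem : List (String × List String))
    (kn cur : List String) (h : isLab s = false) :
    goA (s :: ss) rem kn cur = goA ss (rem ++ [(s, cur)]) kn [] := by
  cases cur <;> simp [goA, isLab] at h ⊢ <;> simp [h]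

-- A over a run of tokens with empty current_label: each gets the empty tuple
lemma goA_tokRun (grp : List String) (h : ∀ y ∈ grp, isLab y = false) :
    ∀ rest rem kn, goA (grp ++ rest) rem kn [] =
      goA rest (rem ++ grp.map (fun u => (u, ([] : List String)))) kn [] := by
  induction grp with
  | nil => simp
  | cons g gs ih =>
    intro rest rem kn
    rw [List.cons_append, goA_token g _ _ _ _ (h g (by simp))]
    rw [ih (fun y hy => h y (by simp [hy])) rest]
    simp

-- A over a run of labels accumulates them into known and current_label
lemma goA_labRun (grp : List String) (h : ∀ y ∈ grp, isLab y = true) :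
    ∀ rest rem kn cur, goA (grp ++ rest) rem kn cur =
      goA rest rem (kn ++ grp.map pvTail1) (cur ++ grp.map pvTail1) := by
  induction grp with
  | nil => simp
  | cons g gs ih =>
    intro rest rem kn cur
    have hg : PySem.Str.startswith g ":" = true := h g (by simp)
    rw [List.cons_append, goA, if_pos hg, ih (fun y hy => h y (by simp [hy]))]
    simp

-- main induction: A's loop agrees with B's run loop whenever the pending run is
-- empty or the next element is a token
lemma goA_eq_goB (n : Nat) : ∀ (rest : List String), rest.length ≤ n →
    ∀ rem kn p, (p = [] ∨ ∀ t ∈ rest.head?, isLab t = false) →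
    goA rest rem kn p = goB (runsB rest) rem kn p := by
  induction n with
  | zero =>
    intro rest hlen rem kn p _
    have : rest = [] := List.eq_nil_of_length_eq_zero (Nat.le_zero.mp hlen)
    subst this; simp [goA, runsB, goB]
  | succ n ih =>
    intro rest hlen rem kn p hp
    cases rest with
    | nil => simp [goA, runsB, goB]
    | cons x xs =>
      have hxslen : xs.length ≤ n := by simpa using hlen
      cases hx : isLab x with
      | false =>
        -- token run: x gets the pending labels, the rest of the run gets []
        have hpe : (fun y => isLab y == isLab x) = (fun y : String => !isLab y) := by
          funext y; simp [hx]
        have hgrp : ∀ y ∈ xs.takeWhile (fun y : String => !isLab y), isLab y = false := by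
          intro y hy
          have := List.mem_takeWhile_imp hy
          simpa using this
        have hdl := List.length_dropWhile_le (fun y : String => !isLab y) xs
        rw [runsB, hpe, hx, goB]
        simp only [Bool.false_eq_true, if_false]
        conv_lhs => rw [show x :: xs =
          x :: (xs.takeWhile (fun y : String => !isLab y) ++ xs.dropWhile (fun y : String => !isLab y))
          by rw [List.takeWhile_append_dropWhile]]
        rw [goA_token x _ _ _ _ hx, goA_tokRun _ hgrp,
            ih _ (le_trans hdl hxslen) _ _ _ (Or.inl rfl)]
        simp
      | true =>
        -- label run: all its names join known_labels and become pending
        have hpnil : p = [] := by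
          cases hp with
          | inl h => exact h
          | inr h => exact absurd (h x rfl) (by simp [hx])
        subst hpnil
        have hpe : (fun y => isLab y == isLab x) = (fun y : String => isLab y) := by
          funext y; simp [hx]
        have hgrp : ∀ y ∈ x :: xs.takeWhile (fun y : String => isLab y), isLab y = true := by
          intro y hy
          rcases List.mem_cons.mp hy with h | h
          · subst h; exact hx
          · exact List.mem_takeWhile_imp h
        have hhead : ∀ t ∈ (xs.dropWhile (fun y : String => isLab y)).head?, isLab t = false := by
          intro t ht
          have := List.head?_dropWhile_not (fun y : String => isLab y) xs
          rw [ht] at this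
          simpa using this
        have hdl := List.length_dropWhile_le (fun y : String => isLab y) xs
        rw [runsB, hpe, hx, goB]
        simp only [if_true]
        conv_lhs => rw [show x :: xs =
          (x :: xs.takeWhile (fun y : String => isLab y)) ++ xs.dropWhile (fun y : String => isLab y)
          by simp [List.takeWhile_append_dropWhile]]
        rw [goA_labRun _ hgrp,
            ih _ (le_trans hdl hxslen) _ _ _ (Or.inr hhead)]
        simp

-- ===== VERDICT (by name: the statement is the Claim_ definition above) =====
theorem label_separator_spec : Claim_equal_label_separator := by
  intro strings _
  unfold Spec_label_separator label_separator label_separator_alt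
  exact goA_eq_goB strings.length strings le_rfl [] [] [] (Or.inl rfl)
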